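-- pv_equiv track=rewrite | github.com/jyscao/advent-of-code-solutions | 2023/24-never-tell-me-the-odds.py | get_mat_coeffs_and_b
-- ===== SOURCE A (Python) =====
-- def get_mat_coeffs_and_b(pos_vel_ls):
--     vec_pairs = [(0, 1), (0, 2)]
--     A, b = [], []
--     for i, j in vec_pairs:
--         (pi_x, pi_y, pi_z), (vi_x, vi_y, vi_z) = pos_vel_ls[i]
--         (pj_x, pj_y, pj_z), (vj_x, vj_y, vj_z) = pos_vel_ls[j]
--
--         x_vec = [0, (vi_z - vj_z), (vj_y - vi_y), 0, (pj_z - pi_z), (pi_y - pj_y)]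
--         y_vec = [(vj_z - vi_z), 0, (vi_x - vj_x), (pi_z - pj_z), 0, (pj_x - pi_x)]
--         z_vec = [(vi_y - vj_y), (vj_x - vi_x), 0, (pj_y - pi_y), (pi_x - pj_x), 0]
--
--         x_b = pi_y * vi_z - pi_z * vi_y - pj_y * vj_z + pj_z * vj_y
--         y_b = pi_z * vi_x - pi_x * vi_z - pj_z * vj_x + pj_x * vj_z
--         z_b = pi_x * vi_y - pi_y * vi_x - pj_x * vj_y + pj_y * vj_x
--
--         A += [x_vec, y_vec, z_vec]
--         b += [x_b, y_b, z_b]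
--
--     return A, b
-- ===== SOURCE B (Python) =====
-- def get_mat_coeffs_and_b(pos_vel_ls):
--     # Levi-Civita tensor eps[a][b][c] = (a-b)*(b-c)*(c-a)//2  (values -1, 0, 1)
--     eps = [[[(a - b) * (b - c) * (c - a) // 2 for c in range(3)] for b in range(3)]
--            for a in range(3)]
--     pairs = [(0, 1), (0, 2)]
--     A, b = [], []
--     for k in range(6):
--         i, j = pairs[k // 3]
--         ax = k % 3
--         (pi, vi), (pj, vj) = pos_vel_ls[i], pos_vel_ls[j]
--         dv = [vi[m] - vj[m] for m in range(3)]
--         dp = [pi[m] - pj[m] for m in range(3)]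
--         row = [sum(eps[ax][c][m] * dv[m] for m in range(3)) for c in range(3)] \
--             + [-sum(eps[ax][c][m] * dp[m] for m in range(3)) for c in range(3)]
--         A.append(row)
--         b.append(sum(eps[ax][m][n] * (pi[m] * vi[n] - pj[m] * vj[n])
--                      for m in range(3) for n in range(3)))
--     return A, b
-- ===== Notes on version B (the rewrite author's own statement) =====
-- stated objective: alternative
-- what changed: B drops the six hand-written sign-juggled rows and the per-pair block construction: it builds a Levi-Civita tensor eps once and produces each of the 6 rows and b-entries in one flat loop over the row index k, every coefficient being a summation sum_m eps[ax][c][m]*d[m] and every b-entry a double summation over the tensor.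
import Mathlib
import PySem

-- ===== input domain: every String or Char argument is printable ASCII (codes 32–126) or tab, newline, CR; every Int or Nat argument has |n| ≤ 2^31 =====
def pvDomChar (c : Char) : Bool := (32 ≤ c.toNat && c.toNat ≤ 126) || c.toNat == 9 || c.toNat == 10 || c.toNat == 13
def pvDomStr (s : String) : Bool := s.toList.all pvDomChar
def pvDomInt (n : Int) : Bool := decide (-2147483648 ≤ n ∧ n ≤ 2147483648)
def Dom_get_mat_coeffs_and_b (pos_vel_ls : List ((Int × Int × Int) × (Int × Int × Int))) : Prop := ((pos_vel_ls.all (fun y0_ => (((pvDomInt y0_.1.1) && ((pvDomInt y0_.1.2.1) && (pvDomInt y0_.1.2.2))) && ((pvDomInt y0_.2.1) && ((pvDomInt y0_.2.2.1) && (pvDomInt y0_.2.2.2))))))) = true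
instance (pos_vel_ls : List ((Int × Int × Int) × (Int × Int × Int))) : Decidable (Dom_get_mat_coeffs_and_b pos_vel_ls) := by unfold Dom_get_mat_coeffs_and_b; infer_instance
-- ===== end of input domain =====

-- B replaces the six hand-written rows by a Levi-Civita-tensor summation over a single flat
-- loop of six row indices; objective: alternative (same cost, index-formula formulation).
-- A raises IndexError when the list has fewer than 3 hailstones; Pre_ excludes exactly those inputs.

-- ===== PORT A =====
def get_mat_coeffs_and_b (pos_vel_ls : List ((Int × Int × Int) × (Int × Int × Int))) : List (List Int) × List Int :=
  let vec_pairs : List (Int × Int) := [(0, 1), (0, 2)]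
  vec_pairs.foldl (fun (acc : List (List Int) × List Int) ij =>
    let (i, j) := ij
    -- pos_vel_ls[i]: Pre_ guarantees the index is in range, so pyGet? is some; getD default unreached
    let ((pi_x, pi_y, pi_z), (vi_x, vi_y, vi_z)) :=
      (PySem.List.pyGet? pos_vel_ls i).getD ((0, 0, 0), (0, 0, 0))
    let ((pj_x, pj_y, pj_z), (vj_x, vj_y, vj_z)) :=
      (PySem.List.pyGet? pos_vel_ls j).getD ((0, 0, 0), (0, 0, 0))
    let x_vec : List Int := [0, (vi_z - vj_z), (vj_y - vi_y), 0, (pj_z - pi_z), (pi_y - pj_y)]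
    let y_vec : List Int := [(vj_z - vi_z), 0, (vi_x - vj_x), (pi_z - pj_z), 0, (pj_x - pi_x)]
    let z_vec : List Int := [(vi_y - vj_y), (vj_x - vi_x), 0, (pj_y - pi_y), (pi_x - pj_x), 0]
    let x_b := pi_y * vi_z - pi_z * vi_y - pj_y * vj_z + pj_z * vj_y
    let y_b := pi_z * vi_x - pi_x * vi_z - pj_z * vj_x + pj_x * vj_z
    let z_b := pi_x * vi_y - pi_y * vi_x - pj_x * vj_y + pj_y * vj_x
    (acc.1 ++ [x_vec, y_vec, z_vec], acc.2 ++ [x_b, y_b, z_b])) ([], [])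

-- ===== PORT B =====
-- Python list / tuple indexing with an index that is in range by construction:
-- pyGet? is some there, so getD's default is unreached (exact on every use below).
def pvIdx {α : Type} (xs : List α) (i : Int) (d : α) : α :=
  (PySem.List.pyGet? xs i).getD d

-- Python 3-tuple indexing t[m] for m = 0,1,2 (the only indices Source B uses)
def pvComp (t : Int × Int × Int) (m : Int) : Int :=
  if m = 0 then t.1 else if m = 1 then t.2.1 else t.2.2

def get_mat_coeffs_and_b_alt (pos_vel_ls : List ((Int × Int × Int) × (Int × Int × Int))) : List (List Int) × List Int :=
  let eps : List (List (List Int)) :=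
    (PySem.List.pyRange 0 3 1).map (fun a =>
      (PySem.List.pyRange 0 3 1).map (fun b =>
        (PySem.List.pyRange 0 3 1).map (fun c =>
          PySem.Int.floordiv ((a - b) * (b - c) * (c - a)) 2)))
  let pairs : List (Int × Int) := [(0, 1), (0, 2)]
  (PySem.List.pyRange 0 6 1).foldl (fun (acc : List (List Int) × List Int) k =>
    let (i, j) := pvIdx pairs (PySem.Int.floordiv k 3) (0, 0)
    let ax := PySem.Int.mod k 3
    let (pvi, pvj) := (pvIdx pos_vel_ls i ((0,0,0),(0,0,0)), pvIdx pos_vel_ls j ((0,0,0),(0,0,0)))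
    let (pi, vi) := pvi
    let (pj, vj) := pvj
    let dv := (PySem.List.pyRange 0 3 1).map (fun m => pvComp vi m - pvComp vj m)
    let dp := (PySem.List.pyRange 0 3 1).map (fun m => pvComp pi m - pvComp pj m)
    let e2 := fun (x y : Int) => pvIdx (pvIdx (pvIdx eps ax []) x []) y 0
    let row :=
      ((PySem.List.pyRange 0 3 1).map (fun c =>
        ((PySem.List.pyRange 0 3 1).map (fun m => e2 c m * pvIdx dv m 0)).sum)) ++
      ((PySem.List.pyRange 0 3 1).map (fun c =>
        -((PySem.List.pyRange 0 3 1).map (fun m => e2 c m * pvIdx dp m 0)).sum))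
    let bk :=
      ((PySem.List.pyRange 0 3 1).flatMap (fun m =>
        (PySem.List.pyRange 0 3 1).map (fun n =>
          e2 m n * (pvComp pi m * pvComp vi n - pvComp pj m * pvComp vj n)))).sum
    (acc.1 ++ [row], acc.2 ++ [bk])) ([], [])

-- ===== PRECONDITION & SPEC =====
-- Pre_ excludes lists with fewer than 3 hailstones, on which A raises IndexError.
def Pre_get_mat_coeffs_and_b (pos_vel_ls : List ((Int × Int × Int) × (Int × Int × Int))) : Prop :=
  3 ≤ pos_vel_ls.length
instance (pos_vel_ls : List ((Int × Int × Int) × (Int × Int × Int))) : Decidable (Pre_get_mat_coeffs_and_b pos_vel_ls) := by unfold Pre_get_mat_coeffs_and_b; infer_instance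

def pvWitness_get_mat_coeffs_and_b : (List ((Int × Int × Int) × (Int × Int × Int))) :=
  [((1, 2, 3), (4, 5, 6)), ((7, 8, 9), (1, 1, 1)), ((2, 0, 1), (3, 2, 1))]

def Spec_get_mat_coeffs_and_b (pos_vel_ls : List ((Int × Int × Int) × (Int × Int × Int))) (out : List (List Int) × List Int) : Prop := out = get_mat_coeffs_and_b_alt pos_vel_ls
instance (pos_vel_ls : List ((Int × Int × Int) × (Int × Int × Int))) (out : List (List Int) × List Int) : Decidable (Spec_get_mat_coeffs_and_b pos_vel_ls out) := by unfold Spec_get_mat_coeffs_and_b; infer_instance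

-- ===== CLAIM (what is proved, stated in full; the proofs are below) =====
def Claim_equal_get_mat_coeffs_and_b : Prop := ∀ (pos_vel_ls : List ((Int × Int × Int) × (Int × Int × Int))), Dom_get_mat_coeffs_and_b pos_vel_ls → Pre_get_mat_coeffs_and_b pos_vel_ls → Spec_get_mat_coeffs_and_b pos_vel_ls (get_mat_coeffs_and_b pos_vel_ls)

-- ===== LEMMAS AND PROOFS =====
theorem pvGet0 {α : Type} (x : α) (xs : List α) : PySem.List.pyGet? (x::xs) 0 = some x := by
  have h : (0:Int) = ((0:Nat):Int) := rfl
  rw [h, PySem.List.pyGet?_natCast]; rfl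

theorem pvGet1 {α : Type} (x y : α) (xs : List α) : PySem.List.pyGet? (x::y::xs) 1 = some y := by
  have h : (1:Int) = ((1:Nat):Int) := rfl
  rw [h, PySem.List.pyGet?_natCast]; rfl

theorem pvGet2 {α : Type} (x y z : α) (xs : List α) : PySem.List.pyGet? (x::y::z::xs) 2 = some z := by
  have h : (2:Int) = ((2:Nat):Int) := rfl
  rw [h, PySem.List.pyGet?_natCast]; rfl


theorem pvFd0 : PySem.Int.floordiv 0 3 = 0 := by decide
theorem pvFd1 : PySem.Int.floordiv 1 3 = 0 := by decide
theorem pvFd2 : PySem.Int.floordiv 2 3 = 0 := by decide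
theorem pvFd3 : PySem.Int.floordiv 3 3 = 1 := by decide
theorem pvFd4 : PySem.Int.floordiv 4 3 = 1 := by decide
theorem pvFd5 : PySem.Int.floordiv 5 3 = 1 := by decide
theorem pvMd0 : PySem.Int.mod 0 3 = 0 := by decide
theorem pvMd1 : PySem.Int.mod 1 3 = 1 := by decide
theorem pvMd2 : PySem.Int.mod 2 3 = 2 := by decide
theorem pvMd3 : PySem.Int.mod 3 3 = 0 := by decide
theorem pvMd4 : PySem.Int.mod 4 3 = 1 := by decide
theorem pvMd5 : PySem.Int.mod 5 3 = 2 := by decide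

theorem pvR3 : PySem.List.pyRange 0 3 1 = [0, 1, 2] := by decide
theorem pvR6 : PySem.List.pyRange 0 6 1 = [0, 1, 2, 3, 4, 5] := by decide

-- ===== VERDICT (by name: the statement is the Claim_ definition above) =====
theorem get_mat_coeffs_and_b_spec : Claim_equal_get_mat_coeffs_and_b := by
  intro ls _ hpre
  unfold Pre_get_mat_coeffs_and_b at hpre
  match ls with
  | a :: b :: c :: rest =>
    obtain ⟨⟨pax, pay, paz⟩, ⟨vax, vay, vaz⟩⟩ := a
    obtain ⟨⟨pbx, pby, pbz⟩, ⟨vbx, vby, vbz⟩⟩ := b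
    obtain ⟨⟨pcx, pcy, pcz⟩, ⟨vcx, vcy, vcz⟩⟩ := c
    simp only [Spec_get_mat_coeffs_and_b, get_mat_coeffs_and_b, get_mat_coeffs_and_b_alt,
      pvR3, pvR6, List.foldl,
      pvFd0, pvFd1, pvFd2, pvFd3, pvFd4, pvFd5,
      pvMd0, pvMd1, pvMd2, pvMd3, pvMd4, pvMd5,
      pvIdx, pvGet0, pvGet1, pvGet2, Option.getD, pvComp,
      List.map_cons, List.map_nil, List.flatMap_cons, List.flatMap_nil,
      List.sum_cons, List.sum_nil,
      List.nil_append, List.cons_append, List.append_nil]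
    norm_num
    and_intros <;> first | rfl | ring
  | [] => simp at hpre
  | [_] => simp at hpre
  | [_, _] => simp at hpre
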